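-- pv_equiv track=rewrite | github.com/AlifSrSE/ProblemSolves | 2056B-findThePermutation.py | solve
-- ===== SOURCE A (Python) =====
-- def solve(g):
--     n = len(g)
--     result = [0] * n
--
--     for i in range(n):
--         sequence = 0
--         for j in range(i + 1, n):
--             if g[i][j] == 0:
--                 sequence += 1
--
--         index = 0
--         while True:
--             while result[index] != 0:
--                 index += 1
--
--             if sequence == 0:
--                 result[index] = i + 1
--                 break
--
--             index += 1
--             sequence -= 1
--
--     return " ".join(map(str, result))
-- ===== SOURCE B (Python) =====
-- def solve(g):
--     n = len(g)
--     result = [0] * n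
--     available = list(range(n))
--     for i in range(n):
--         s = sum(1 for j in range(i + 1, n) if g[i][j] == 0)
--         pos = available.pop(s)
--         result[pos] = i + 1
--     return " ".join(map(str, result))
-- ===== Notes on version B (the rewrite author's own statement) =====
-- stated objective: simpler
-- what changed: Replaces A's nested rescanning while-loops (skip filled cells, consume empty cells one by one) with an explicit ordered list of free positions from which the s-th entry is removed by a single indexed pop.
import Mathlib
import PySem

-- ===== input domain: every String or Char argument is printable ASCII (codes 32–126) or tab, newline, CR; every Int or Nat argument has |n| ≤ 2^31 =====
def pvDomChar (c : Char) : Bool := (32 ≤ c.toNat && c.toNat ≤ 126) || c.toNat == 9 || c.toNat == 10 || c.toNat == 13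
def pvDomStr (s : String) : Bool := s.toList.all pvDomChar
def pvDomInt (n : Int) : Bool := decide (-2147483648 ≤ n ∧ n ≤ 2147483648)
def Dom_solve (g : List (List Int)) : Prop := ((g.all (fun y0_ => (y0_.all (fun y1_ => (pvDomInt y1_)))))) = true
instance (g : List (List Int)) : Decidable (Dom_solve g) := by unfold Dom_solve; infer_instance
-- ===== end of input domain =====

-- B replaces A's nested rescanning while-loops with an ordered free-position list and one indexed pop per row (objective: simpler).

-- ===== PORT A =====
-- the 'while True' placement loop of A: skip filled cells, consume 'sequence' empty cells, place at the next empty one.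
-- The fuel argument only makes the loop total; inside Pre_solve it is never exhausted (placement happens at an index < result.length).
def solvePlace (result : List Int) (index : Nat) (seq : Int) (val : Int) : Nat → List Int
  | 0 => result
  | fuel+1 =>
    if (PySem.List.pyGet? result (index : Int)).getD 0 ≠ 0 then
      solvePlace result (index+1) seq val fuel
    else if seq = 0 then PySem.List.pySetD result (index : Int) val
    else solvePlace result (index+1) (seq-1) val fuel

def solve (g : List (List Int)) : String :=
  let n := g.length
  let result := (List.range n).foldl (fun result (i : Nat) =>
    let seq := (PySem.List.pyRange ((i : Int)+1) (n : Int) 1).foldl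
      (fun (s : Int) j => if (PySem.List.pyGet? (g.getD i []) j).getD 1 = 0 then s+1 else s) 0
    solvePlace result 0 seq ((i : Int)+1) (n+1)) (List.replicate n 0)
  PySem.Str.join " " (result.map PySem.Int.toStr)

-- ===== PORT B =====
def solve_alt (g : List (List Int)) : String :=
  let n := g.length
  let st := (List.range n).foldl (fun (st : List Int × List Nat) (i : Nat) =>
      let s := ((PySem.List.pyRange ((i : Int)+1) (n : Int) 1).filter
                 (fun j => decide ((PySem.List.pyGet? (g.getD i []) j).getD 1 = 0))).length
      match PySem.List.pop? st.2 (s : Int) with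
      | some (pos, rest) => (st.1.set pos ((i : Int)+1), rest)
      | none => st) (List.replicate n 0, List.range n)
  PySem.Str.join " " (st.1.map PySem.Int.toStr)

-- ===== PRECONDITION & SPEC =====
-- Pre_ excludes exactly the ragged inputs where some non-last row is shorter than len(g):
-- there Python A raises IndexError on g[i][j] (and B raises identically).
def Pre_solve (g : List (List Int)) : Prop := ∀ r ∈ g.dropLast, g.length ≤ r.length
instance (g : List (List Int)) : Decidable (Pre_solve g) := by unfold Pre_solve; infer_instance
def pvWitness_solve : List (List Int) := [[0, 1], [1, 0]]

def Spec_solve (g : List (List Int)) (out : String) : Prop := out = solve_alt g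
instance (g : List (List Int)) (out : String) : Decidable (Spec_solve g out) := by unfold Spec_solve; infer_instance

-- ===== CLAIM (what is proved, stated in full; the proofs are below) =====
def Claim_equal_solve : Prop := ∀ (g : List (List Int)), Dom_solve g → Pre_solve g → Spec_solve g (solve g)

-- ===== LEMMAS AND PROOFS =====

-- the ordered list of still-zero positions of `r`, from position `index` on
def freeFrom (r : List Int) (index : Nat) : List Nat :=
  (List.range' index (r.length - index)).filter (fun p => decide (r.getD p 1 = 0))

def freeL (r : List Int) : List Nat := freeFrom r 0

lemma freeFrom_ge {r : List Int} {index : Nat} (h : r.length ≤ index) : freeFrom r index = [] := by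
  simp [freeFrom, Nat.sub_eq_zero_of_le h]

lemma freeFrom_lt {r : List Int} {index : Nat} (h : index < r.length) :
    freeFrom r index = if r.getD index 1 = 0 then index :: freeFrom r (index+1)
                       else freeFrom r (index+1) := by
  unfold freeFrom
  have h1 : r.length - index = (r.length - (index+1)) + 1 := by omega
  rw [h1, List.range'_succ]
  simp [List.filter_cons]

lemma freeL_eq (r : List Int) :
    freeL r = (List.range r.length).filter (fun p => decide (r.getD p 1 = 0)) := by
  unfold freeL freeFrom
  rw [List.range_eq_range']
  simp

lemma solvePlace_eq : ∀ (fuel : Nat) (r : List Int) (index s : Nat) (val : Int),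
    r.length + 1 ≤ index + fuel → s < (freeFrom r index).length →
    solvePlace r index (s : Int) val fuel = r.set ((freeFrom r index).getD s 0) val := by
  intro fuel
  induction fuel with
  | zero =>
    intro r index s val h hs
    rw [freeFrom_ge (by omega)] at hs
    simp at hs
  | succ fuel ih =>
    intro r index s val h hs
    by_cases hidx : index < r.length
    · have hsome : r[index]? = some r[index] := List.getElem?_eq_getElem hidx
      have hval0 : r.getD index 1 = r[index] := List.getD_eq_getElem r 1 hidx
      rw [freeFrom_lt hidx, hval0] at hs ⊢
      by_cases hz : r[index] = 0
      · rw [if_pos hz] at hs ⊢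
        cases s with
        | zero =>
          simp [solvePlace, hsome, hz]
        | succ t =>
          have h1 : ¬(((t+1 : Nat) : Int) = 0) := by omega
          have h2 : ((t+1 : Nat) : Int) - 1 = ((t : Nat) : Int) := by push_cast; omega
          have hrec : solvePlace r index ((t+1 : Nat) : Int) val (fuel+1)
              = solvePlace r (index+1) ((t : Nat) : Int) val fuel := by
            simp only [solvePlace]
            rw [PySem.List.pyGet?_natCast, hsome]
            rw [if_neg (by simp [hz]), if_neg h1, h2]
          rw [hrec, ih r (index+1) t val (by omega) (by simpa using hs)]
          simp
      · rw [if_neg hz] at hs ⊢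
        have hrec : solvePlace r index ((s : Nat) : Int) val (fuel+1)
            = solvePlace r (index+1) ((s : Nat) : Int) val fuel := by
          simp only [solvePlace]
          rw [PySem.List.pyGet?_natCast, hsome]
          rw [if_pos (by simp [hz])]
        rw [hrec, ih r (index+1) s val (by omega) hs]
    · rw [freeFrom_ge (by omega)] at hs
      simp at hs

lemma freeL_set {r : List Int} {s : Nat} {val : Int} (hs : s < (freeL r).length)
    (hval : val ≠ 0) :
    freeL (r.set ((freeL r).getD s 0) val) = (freeL r).eraseIdx s := by
  have hsget : (freeL r).getD s 0 = (freeL r)[s] := List.getD_eq_getElem _ _ hs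
  have hfacts : ∀ x ∈ freeL r, x < r.length := by
    intro x hx
    rw [freeL_eq] at hx
    exact List.mem_range.mp (List.mem_filter.mp hx).1
  have hnodup : (freeL r).Nodup := by
    rw [freeL_eq]; exact List.Nodup.filter _ List.nodup_range
  obtain ⟨p, hp⟩ : ∃ p, p = (freeL r).getD s 0 := ⟨_, rfl⟩
  rw [← hp]
  have hpe : p = (freeL r)[s] := by rw [hp, hsget]
  have hpn : p < r.length := by
    rw [hpe]; exact hfacts _ (List.getElem_mem hs)
  have step1 : freeL (r.set p val)
      = (List.range r.length).filter
        (fun q => decide (q ≠ p) && decide (r.getD q 1 = 0)) := by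
    rw [freeL_eq, List.length_set]
    apply List.filter_congr
    intro q hq
    have hqn : q < r.length := List.mem_range.mp hq
    rw [List.getD_eq_getElem _ 1 (by simpa using hqn), List.getElem_set]
    by_cases hpq : p = q
    · subst hpq
      simp [hval]
    · rw [if_neg hpq, ← List.getD_eq_getElem r 1 hqn]
      have hqp : q ≠ p := fun hh => hpq hh.symm
      simp [hqp]
  have step2 : (List.range r.length).filter
        (fun q => decide (q ≠ p) && decide (r.getD q 1 = 0))
      = (freeL r).filter (fun q => decide (q ≠ p)) := by
    conv_rhs => rw [freeL_eq]
    rw [List.filter_filter]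
  have step3 : (freeL r).filter (fun q => decide (q ≠ p))
      = (freeL r).erase p := by
    rw [List.Nodup.erase_eq_filter hnodup]
    apply List.filter_congr
    intro q _
    by_cases h : q = p <;> simp [h, bne, beq_eq_decide]
  rw [step1, step2, step3, hpe, List.Nodup.erase_getElem hnodup s hs]

lemma freeL_replicate (n : Nat) : freeL (List.replicate n (0 : Int)) = List.range n := by
  rw [freeL_eq, List.length_replicate]
  apply List.filter_eq_self.mpr
  intro q hq
  simp [List.mem_range.mp hq]

lemma loop_eq (g : List (List Int)) : ∀ (cnt k : Nat) (r : List Int),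
    k + cnt = g.length → r.length = g.length → (freeL r).length = cnt →
    (List.range' k cnt).foldl (fun result (i : Nat) =>
        let seq := (PySem.List.pyRange ((i : Int)+1) (g.length : Int) 1).foldl
          (fun (s : Int) j => if (PySem.List.pyGet? (g.getD i []) j).getD 1 = 0 then s+1 else s) 0
        solvePlace result 0 seq ((i : Int)+1) (g.length+1)) r
    = ((List.range' k cnt).foldl (fun (st : List Int × List Nat) (i : Nat) =>
        let s := ((PySem.List.pyRange ((i : Int)+1) (g.length : Int) 1).filter
                 (fun j => decide ((PySem.List.pyGet? (g.getD i []) j).getD 1 = 0))).length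
        match PySem.List.pop? st.2 (s : Int) with
        | some (pos, rest) => (st.1.set pos ((i : Int)+1), rest)
        | none => st) (r, freeL r)).1 := by
  intro cnt
  induction cnt with
  | zero => intro k r hk hlen hfree; simp
  | succ cnt ih =>
    intro k r hk hlen hfree
    rw [List.range'_succ, List.foldl_cons, List.foldl_cons]
    simp only []
    set P : Int → Bool := fun j => decide ((PySem.List.pyGet? (g.getD k []) j).getD 1 = 0) with hP
    set c : Nat := List.countP P (PySem.List.pyRange ((k : Int)+1) (g.length : Int) 1) with hc
    have hcb : c < (freeL r).length := by
      have h1 : c ≤ (PySem.List.pyRange ((k : Int)+1) (g.length : Int) 1).length :=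
        List.countP_le_length
      rw [PySem.List.length_pyRange_one] at h1
      omega
    have hseq : (PySem.List.pyRange ((k : Int)+1) (g.length : Int) 1).foldl
        (fun (s : Int) j => if (PySem.List.pyGet? (g.getD k []) j).getD 1 = 0 then s+1 else s) 0
        = (c : Int) := by
      have := PySem.List.foldl_count_if P (PySem.List.pyRange ((k : Int)+1) (g.length : Int) 1) 0
      simpa [hP] using this
    have hfi : ((PySem.List.pyRange ((k : Int)+1) (g.length : Int) 1).filter P).length = c := by
      rw [hc, List.countP_eq_length_filter]
    have hA : solvePlace r 0 (c : Int) ((k : Int)+1) (g.length+1)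
        = r.set ((freeL r).getD c 0) ((k : Int)+1) := by
      exact solvePlace_eq (g.length+1) r 0 c ((k : Int)+1) (by omega) hcb
    have hpop : PySem.List.pop? (freeL r) (c : Int)
        = some ((freeL r)[c], (freeL r).eraseIdx c) :=
      PySem.List.pop?_natCast (freeL r) c hcb
    rw [hseq, hA, hfi, hpop]
    simp only []
    have hsetfree : freeL (r.set ((freeL r).getD c 0) ((k : Int)+1)) = (freeL r).eraseIdx c :=
      freeL_set hcb (by omega)
    have hgc : (freeL r).getD c 0 = (freeL r)[c] := List.getD_eq_getElem _ _ hcb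
    rw [← hgc, ← hsetfree]
    exact ih (k+1) _ (by omega) (by rw [List.length_set, hlen])
      (by rw [hsetfree, List.length_eraseIdx, if_pos hcb]; omega)

-- ===== VERDICT (by name: the statement is the Claim_ definition above) =====
theorem solve_spec : Claim_equal_solve := by
  intro g _ _
  unfold Spec_solve solve solve_alt
  have h := loop_eq g g.length 0 (List.replicate g.length 0)
    (by omega) (by simp) (by rw [freeL_replicate]; simp)
  simp only [List.range_eq_range']
  rw [h, freeL_replicate, List.range_eq_range']
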